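-- pv_equiv track=rewrite | github.com/wxthu/haixin_project | plot_ctxlen_bench.py | group_by_batch_size
-- ===== SOURCE A (Python) =====
-- def group_by_batch_size(results):
--     by_bs = {}
--     for r in results:
--         bs = r["batch_size"]
--         by_bs.setdefault(bs, []).append(r)
--     for bs in by_bs:
--         by_bs[bs].sort(key=lambda x: x["context_len"])
--     return by_bs
-- ===== SOURCE B (Python) =====
-- def group_by_batch_size(results):
--     # seed keys in first-appearance order, then one global stable sort + flat bucketing
--     by_bs = {}
--     for r in results:
--         by_bs.setdefault(r["batch_size"], [])
--     for r in sorted(results, key=lambda x: x["context_len"]):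
--         by_bs[r["batch_size"]].append(r)
--     return by_bs
-- ===== Notes on version B (the rewrite author's own statement) =====
-- stated objective: alternative
-- what changed: A per-group sorts each bucket after bucketing; B seeds the keys in first-appearance order, does one global stable sort of all records by context_len, then buckets them in a single flat pass.
import Mathlib
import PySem

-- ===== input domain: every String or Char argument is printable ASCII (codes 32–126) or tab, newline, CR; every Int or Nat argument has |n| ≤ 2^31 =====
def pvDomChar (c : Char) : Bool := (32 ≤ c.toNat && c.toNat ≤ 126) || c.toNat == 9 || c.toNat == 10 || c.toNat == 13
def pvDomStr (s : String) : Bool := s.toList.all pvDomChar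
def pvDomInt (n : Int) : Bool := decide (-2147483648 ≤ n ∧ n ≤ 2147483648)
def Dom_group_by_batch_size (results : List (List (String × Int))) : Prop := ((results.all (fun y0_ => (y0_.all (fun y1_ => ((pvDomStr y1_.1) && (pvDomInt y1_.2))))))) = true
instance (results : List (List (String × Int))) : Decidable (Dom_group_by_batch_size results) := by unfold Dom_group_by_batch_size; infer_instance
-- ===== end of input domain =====

-- B replaces A's per-group sorting by one global stable sort plus a flat bucketing pass
-- (keys seeded in first-appearance order); objective: alternative decomposition, same cost.

-- r[k] for a record dict r; total form of the lookup — Pre_ guarantees the key is present.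
def pvRecGet (r : List (String × Int)) (k : String) : Int := (PySem.Dict.mk r).getD k 0

-- ===== PORT A =====
def group_by_batch_size (results : List (List (String × Int))) : List (Int × List (List (String × Int))) :=
  -- by_bs.setdefault(bs, []).append(r)  ==  by_bs[bs] = by_bs.get(bs, []) + [r]
  let by_bs := results.foldl
    (fun d r => d.modify (pvRecGet r "batch_size") [] (fun l => l ++ [r])) PySem.Dict.empty
  -- for bs in by_bs: by_bs[bs].sort(key=lambda x: x["context_len"])
  let by_bs2 := by_bs.keys.foldl
    (fun d bs => d.insert bs (PySem.List.sorted (d.getD bs []) (fun x => pvRecGet x "context_len"))) by_bs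
  by_bs2.items

-- ===== PORT B =====
def group_by_batch_size_alt (results : List (List (String × Int))) : List (Int × List (List (String × Int))) :=
  -- for r in results: by_bs.setdefault(r["batch_size"], [])
  let seeded := results.foldl
    (fun d r => d.setdefault (pvRecGet r "batch_size") []) PySem.Dict.empty
  -- for r in sorted(results, key=lambda x: x["context_len"]): by_bs[r["batch_size"]].append(r)
  let srt := PySem.List.sorted results (fun x => pvRecGet x "context_len")
  (srt.foldl (fun d r => d.modify (pvRecGet r "batch_size") [] (fun l => l ++ [r])) seeded).items

-- ===== PRECONDITION & SPEC =====
-- Pre_: every record carries the keys "batch_size" and "context_len"; otherwise Python A raises KeyError.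
def Pre_group_by_batch_size (results : List (List (String × Int))) : Prop :=
  (results.all (fun r => (PySem.Dict.mk r).contains "batch_size" && (PySem.Dict.mk r).contains "context_len")) = true
instance (results : List (List (String × Int))) : Decidable (Pre_group_by_batch_size results) := by unfold Pre_group_by_batch_size; infer_instance

def pvWitness_group_by_batch_size : (List (List (String × Int))) :=
  [[("batch_size", 1), ("context_len", 7)], [("batch_size", 1), ("context_len", 3)]]

def Spec_group_by_batch_size (results : List (List (String × Int))) (out : List (Int × List (List (String × Int)))) : Prop := out = group_by_batch_size_alt results
instance (results : List (List (String × Int))) (out : List (Int × List (List (String × Int)))) : Decidable (Spec_group_by_batch_size results out) := by unfold Spec_group_by_batch_size; infer_instance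

-- ===== CLAIM (what is proved, stated in full; the proofs are below) =====
def Claim_equal_group_by_batch_size : Prop := ∀ (results : List (List (String × Int))), Dom_group_by_batch_size results → Pre_group_by_batch_size results → Spec_group_by_batch_size results (group_by_batch_size results)

-- ===== LEMMAS AND PROOFS =====

-- insertBy puts x in front when it goes before every element.
theorem insertBy_cons_of_forall_before {α : Type} (bef : α → α → Bool) (x : α) (l : List α)
    (h : ∀ z ∈ l, bef x z = true) : PySem.List.insertBy bef x l = x :: l := by
  cases l with
  | nil => rfl
  | cons y ys => simp [PySem.List.insertBy, h y (by simp)]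

-- filtering commutes with stable insertion into a key-sorted list
theorem filter_insertBy {α : Type} (p : α → Bool) (key : α → Int) (x : α) (ys : List α)
    (h : ys.Pairwise (fun a b => key a ≤ key b)) :
    (PySem.List.insertBy (fun a b => decide (key a < key b)) x ys).filter p =
      if p x then PySem.List.insertBy (fun a b => decide (key a < key b)) x (ys.filter p)
      else ys.filter p := by
  induction ys with
  | nil => by_cases hpx : p x <;> simp [PySem.List.insertBy, List.filter, hpx]
  | cons y ys ih =>
    rcases List.pairwise_cons.mp h with ⟨hy, hys⟩
    by_cases hlt : key x < key y
    · -- x inserted before y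
      simp only [PySem.List.insertBy, hlt, decide_true, if_true]
      by_cases hpx : p x
      · by_cases hpy : p y
        · simp [List.filter, hpx, hpy, PySem.List.insertBy, hlt]
        · simp only [List.filter, hpx, hpy]
          rw [insertBy_cons_of_forall_before]
          · simp
          · intro z hz
            have hzy : z ∈ ys := List.mem_of_mem_filter hz
            simp only [decide_eq_true_iff]
            exact lt_of_lt_of_le hlt (hy z hzy)
      · simp [List.filter, hpx]
    · -- x goes past y
      have hstep : ∀ l : List α, PySem.List.insertBy (fun a b => decide (key a < key b)) x (y :: l)
          = y :: PySem.List.insertBy (fun a b => decide (key a < key b)) x l := by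
        intro l; simp [PySem.List.insertBy, hlt]
      rw [hstep]
      by_cases hpy : p y
      · rw [List.filter_cons_of_pos hpy, List.filter_cons_of_pos hpy, ih hys]
        by_cases hpx : p x
        · simp [hpx, hstep]
        · simp [hpx]
      · rw [List.filter_cons_of_neg hpy, List.filter_cons_of_neg hpy, ih hys]

-- stable insertion preserves key-sortedness
theorem pairwise_insertBy {α : Type} (key : α → Int) (x : α) (ys : List α)
    (h : ys.Pairwise (fun a b => key a ≤ key b)) :
    (PySem.List.insertBy (fun a b => decide (key a < key b)) x ys).Pairwise
      (fun a b => key a ≤ key b) := by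
  induction ys with
  | nil => simp [PySem.List.insertBy]
  | cons y ys ih =>
    rcases List.pairwise_cons.mp h with ⟨hy, hys⟩
    by_cases hlt : key x < key y
    · simp only [PySem.List.insertBy, hlt, decide_true, if_true]
      refine List.pairwise_cons.mpr ⟨?_, h⟩
      intro z hz
      rcases List.mem_cons.mp hz with rfl | h2
      · exact le_of_lt hlt
      · exact le_of_lt (lt_of_lt_of_le hlt (hy z h2))
    · simp only [PySem.List.insertBy, hlt, decide_false]
      refine List.pairwise_cons.mpr ⟨?_, ih hys⟩
      intro z hz
      rcases (PySem.List.mem_insertBy _ _ _ _).mp hz with h1 | h2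
      · subst h1; omega
      · exact hy z h2

theorem foldl_insertBy_filter {α : Type} (p : α → Bool) (key : α → Int) (xs : List α) :
    ∀ acc : List α, acc.Pairwise (fun a b => key a ≤ key b) →
    (xs.foldl (fun acc x => PySem.List.insertBy (fun a b => decide (key a < key b)) x acc) acc).filter p =
      (xs.filter p).foldl (fun acc x => PySem.List.insertBy (fun a b => decide (key a < key b)) x acc)
        (acc.filter p) := by
  induction xs with
  | nil => intro acc _; rfl
  | cons x xs ih =>
    intro acc hacc
    simp only [List.foldl_cons, List.filter]
    rw [ih _ (pairwise_insertBy key x acc hacc), filter_insertBy p key x acc hacc]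
    by_cases hpx : p x
    · simp [hpx]
    · simp [hpx]

-- filtering commutes with Python's stable sort
theorem filter_sorted {α : Type} (p : α → Bool) (key : α → Int) (xs : List α) :
    (PySem.List.sorted xs key).filter p = PySem.List.sorted (xs.filter p) key := by
  rw [PySem.List.sorted_eq_foldl_insertBy, PySem.List.sorted_eq_foldl_insertBy]
  simpa using foldl_insertBy_filter p key xs [] (by simp)

-- the grouping loop: the bucket of c is the subsequence of l with key c
theorem getD_grouping {κ : Type} [BEq κ] [LawfulBEq κ] {β : Type} (l : List β) (key : β → κ)
    (d : PySem.Dict κ (List β)) (c : κ) :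
    (l.foldl (fun d r => d.modify (key r) [] (fun v => v ++ [r])) d).getD c [] =
      d.getD c [] ++ l.filter (fun r => key r == c) := by
  have h := PySem.Dict.getD_foldl_modify_append (l.map (fun r => (key r, r))) d c
  rw [List.foldl_map] at h
  simpa [List.filter_map, Function.comp_def] using h

-- a fold inserting at keys not containing c leaves getD c alone
theorem getD_foldl_insert_not_mem {ν : Type} (l : List Int) (g : PySem.Dict Int ν → Int → ν)
    (d : PySem.Dict Int ν) (c : Int) (d0 : ν) (hc : c ∉ l) :
    (l.foldl (fun d bs => d.insert bs (g d bs)) d).getD c d0 = d.getD c d0 := by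
  induction l generalizing d with
  | nil => rfl
  | cons b l ih =>
    simp only [List.foldl_cons]
    rw [ih _ (fun h => hc (List.mem_cons_of_mem _ h))]
    rw [PySem.Dict.getD_insert, if_neg (by intro h; subst h; exact hc List.mem_cons_self)]

-- the per-key rewriting loop applied over Nodup keys: each bucket gets f applied once
theorem getD_foldl_insert_mem {ν : Type} (l : List Int) (f : ν → ν) (d : PySem.Dict Int ν)
    (c : Int) (d0 : ν) (hnd : l.Nodup) (hc : c ∈ l) :
    (l.foldl (fun d bs => d.insert bs (f (d.getD bs d0))) d).getD c d0 = f (d.getD c d0) := by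
  induction l generalizing d with
  | nil => cases hc
  | cons b l ih =>
    rcases List.nodup_cons.mp hnd with ⟨hb, hnl⟩
    simp only [List.foldl_cons]
    rcases List.mem_cons.mp hc with rfl | hcl
    · rw [getD_foldl_insert_not_mem l (fun d bs => f (d.getD bs d0)) _ c d0 hb]
      rw [PySem.Dict.getD_insert]; simp
    · rw [ih _ hnl hcl, PySem.Dict.getD_insert, if_neg (by intro h; subst h; exact hb hcl)]

-- B's seeding loop: key list in first-appearance order
theorem keys_seed (results : List (List (String × Int))) (d : PySem.Dict Int (List (List (String × Int)))) :
    (results.foldl (fun d r => d.setdefault (pvRecGet r "batch_size") []) d).keys =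
      PySem.Set.update d.keys (results.map (fun r => pvRecGet r "batch_size")) := by
  induction results generalizing d with
  | nil => rfl
  | cons r rs ih =>
    simp only [List.foldl_cons, List.map_cons]
    rw [ih]
    have : PySem.Set.update d.keys (pvRecGet r "batch_size" :: rs.map (fun r => pvRecGet r "batch_size")) =
        PySem.Set.update (PySem.Set.add d.keys (pvRecGet r "batch_size")) (rs.map (fun r => pvRecGet r "batch_size")) := rfl
    rw [this]
    congr 1
    by_cases hcont : d.contains (pvRecGet r "batch_size") = true
    · rw [PySem.Dict.setdefault_of_contains _ _ hcont,
        PySem.Set.add_of_mem ((PySem.Dict.contains_iff_mem_keys d _).mp hcont)]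
    · rw [PySem.Dict.setdefault_of_not_contains _ _ (by simpa using hcont),
        PySem.Dict.keys_insert_of_not_contains _ _ (by simpa using hcont),
        PySem.Set.add_of_not_mem]
      intro hmem
      exact hcont ((PySem.Dict.contains_iff_mem_keys d _).mpr hmem)

-- B's seeding loop only ever stores []
theorem getD_seed_nil (results : List (List (String × Int))) (d : PySem.Dict Int (List (List (String × Int))))
    (hd : ∀ c, d.getD c [] = []) (c : Int) :
    (results.foldl (fun d r => d.setdefault (pvRecGet r "batch_size") []) d).getD c [] = [] := by
  induction results generalizing d with
  | nil => exact hd c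
  | cons r rs ih =>
    simp only [List.foldl_cons]
    refine ih _ (fun c' => ?_)
    by_cases hcont : d.contains (pvRecGet r "batch_size") = true
    · rw [PySem.Dict.setdefault_of_contains _ _ hcont]; exact hd c'
    · rw [PySem.Dict.setdefault_of_not_contains _ _ (by simpa using hcont),
        PySem.Dict.getD_insert]
      split
      · rfl
      · exact hd c'

-- updating a set with elements it already has changes nothing
theorem set_update_of_subset {α : Type} [BEq α] [LawfulBEq α] (s : PySem.Set α) (xs : List α)
    (h : ∀ x ∈ xs, x ∈ s) : PySem.Set.update s xs = s := by
  rw [PySem.Set.update_eq_append_filter]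
  have : (PySem.Set.ofList xs).filter (fun y => !PySem.Set.contains s y) = [] := by
    rw [List.filter_eq_nil_iff]
    intro a ha
    have : a ∈ s := h a ((PySem.Set.mem_ofList _ _).mp ha)
    simp [this]
  rw [this, List.append_nil]

-- ===== VERDICT (by name: the statement is the Claim_ definition above) =====
theorem group_by_batch_size_spec : Claim_equal_group_by_batch_size := by
  intro results _ _
  show group_by_batch_size results = group_by_batch_size_alt results
  unfold group_by_batch_size group_by_batch_size_alt
  simp only []
  set key : List (String × Int) → Int := fun r => pvRecGet r "batch_size" with hkey
  set ctx : List (String × Int) → Int := fun x => pvRecGet x "context_len" with hctx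
  set d1 : PySem.Dict Int (List (List (String × Int))) :=
    results.foldl (fun d r => d.modify (key r) [] (fun l => l ++ [r])) PySem.Dict.empty with hd1
  set dB1 : PySem.Dict Int (List (List (String × Int))) :=
    results.foldl (fun d r => d.setdefault (key r) []) PySem.Dict.empty with hdB1
  -- keys of all four dicts
  have hK1 : d1.keys = PySem.Set.ofList (results.map key) := by
    rw [hd1, PySem.Dict.keys_foldl_modify_key results key [] (fun _ r v => v ++ [r])]
    exact PySem.Set.update_nil_left _
  have hKB1 : dB1.keys = PySem.Set.ofList (results.map key) := by
    rw [hdB1, keys_seed]; exact PySem.Set.update_nil_left _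
  have hnodup : (PySem.Set.ofList (results.map key)).Nodup := PySem.Set.nodup_ofList _
  set d2 : PySem.Dict Int (List (List (String × Int))) :=
    d1.keys.foldl (fun d bs => d.insert bs (PySem.List.sorted (d.getD bs []) ctx)) d1 with hd2
  set dB2 : PySem.Dict Int (List (List (String × Int))) :=
    (PySem.List.sorted results ctx).foldl (fun d r => d.modify (key r) [] (fun l => l ++ [r])) dB1 with hdB2
  have hK2 : d2.keys = PySem.Set.ofList (results.map key) := by
    rw [hd2, PySem.Dict.keys_foldl_insert, hK1, set_update_of_subset]
    intro x hx; exact hx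
  have hKB2 : dB2.keys = PySem.Set.ofList (results.map key) := by
    rw [hdB2, PySem.Dict.keys_foldl_modify_key _ key [] (fun _ r v => v ++ [r]), hKB1,
      set_update_of_subset]
    intro x hx
    rcases List.mem_map.mp hx with ⟨r, hr, rfl⟩
    exact (PySem.Set.mem_ofList _ _).mpr
      (List.mem_map.mpr ⟨r, (PySem.List.mem_sorted _ _ _ _).mp hr, rfl⟩)
  -- buckets agree at every key
  have hval : ∀ c ∈ PySem.Set.ofList (results.map key), d2.getD c [] = dB2.getD c [] := by
    intro c hc
    have hA : d2.getD c [] = PySem.List.sorted (results.filter (fun r => key r == c)) ctx := by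
      rw [hd2, getD_foldl_insert_mem d1.keys (fun v => PySem.List.sorted v ctx) d1 c []
        (hK1 ▸ hnodup) (hK1 ▸ hc)]
      rw [hd1, getD_grouping results key PySem.Dict.empty c]
      simp [PySem.Dict.getD_empty]
    have hB : dB2.getD c [] = PySem.List.sorted (results.filter (fun r => key r == c)) ctx := by
      rw [hdB2, getD_grouping _ key dB1 c, getD_seed_nil results PySem.Dict.empty
        (fun c' => PySem.Dict.getD_empty c' []) c]
      rw [filter_sorted (fun r => key r == c) ctx results]
      simp
    rw [hA, hB]
  -- items agree
  rw [PySem.Dict.items_eq_map_keys d2 (hK2 ▸ hnodup) [],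
    PySem.Dict.items_eq_map_keys dB2 (hKB2 ▸ hnodup) [], hK2, hKB2]
  exact List.map_congr_left (fun k hk => by rw [hval k hk])
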